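-- pv_equiv track=rewrite | github.com/lightly-ai/lightly-train | src/lightly_train/_metrics/metric_args.py | derive_best_metric_mode
-- ===== SOURCE A (Python) =====
-- from collections.abc import Mapping, Sequence
-- from typing import ClassVar, Literal
--
-- def derive_best_metric_mode(
--     watch_metric: str,
--     split: str,
--     quality_metric_modes: Mapping[str, Literal["min", "max"]],
--     loss_names: Sequence[str],
-- ) -> Literal["min", "max"]:
--     """Derive best_metric_mode from a watch_metric key.
--
--     Looks up the watch_metric in:
--     1. quality_metric_modes (full keys like "{split}_metric/miou")
--     2. loss keys ("{split}_loss" or "{split}_loss/{name}") — always "min"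
--
--     If watch_metric is not found in the valid keys for the given split,
--     returns "max" as a safe default (e.g., when split="train" but
--     watch_metric references a "val_*" key).
--
--     Args:
--         watch_metric: Full metric key to watch (e.g., "val_metric/miou", "val_loss").
--         split: Current split (e.g., "val", "train").
--         quality_metric_modes: Mapping from full quality metric key to mode.
--             Built by the caller from their MetricArgs fields.
--         loss_names: Loss names tracked (e.g., ["loss", "loss_vfl"]).
--
--     Returns:
--         "min" or "max" mode for the watch_metric.
--     """
--     # Check quality metrics
--     if watch_metric in quality_metric_modes:
--         return quality_metric_modes[watch_metric]
--
--     # Check loss keys (always "min")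
--     loss_keys: set[str] = set()
--     for name in loss_names:
--         if name == "loss":
--             loss_keys.add(f"{split}_loss")
--         else:
--             loss_keys.add(f"{split}_loss/{name}")
--     if watch_metric in loss_keys:
--         return "min"
--
--     # watch_metric not found for this split — safe default
--     return "max"
-- ===== SOURCE B (Python) =====
-- def derive_best_metric_mode(watch_metric, split, quality_metric_modes, loss_names):
--     if watch_metric in quality_metric_modes:
--         return quality_metric_modes[watch_metric]
--     if watch_metric == f"{split}_loss":
--         return "min" if "loss" in loss_names else "max"
--     prefix = f"{split}_loss/"
--     if watch_metric.startswith(prefix):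
--         name = watch_metric[len(prefix):]
--         if name in loss_names and name != "loss":
--             return "min"
--     return "max"
-- ===== Notes on version B (the rewrite author's own statement) =====
-- stated objective: faster
-- what changed: Instead of materialising the set of all loss keys from loss_names and testing membership, B decomposes watch_metric itself: an equality test against '{split}_loss' (then 'loss' in loss_names) or a prefix test against '{split}_loss/' followed by one membership test of the stripped name (excluding 'loss').
import Mathlib
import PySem

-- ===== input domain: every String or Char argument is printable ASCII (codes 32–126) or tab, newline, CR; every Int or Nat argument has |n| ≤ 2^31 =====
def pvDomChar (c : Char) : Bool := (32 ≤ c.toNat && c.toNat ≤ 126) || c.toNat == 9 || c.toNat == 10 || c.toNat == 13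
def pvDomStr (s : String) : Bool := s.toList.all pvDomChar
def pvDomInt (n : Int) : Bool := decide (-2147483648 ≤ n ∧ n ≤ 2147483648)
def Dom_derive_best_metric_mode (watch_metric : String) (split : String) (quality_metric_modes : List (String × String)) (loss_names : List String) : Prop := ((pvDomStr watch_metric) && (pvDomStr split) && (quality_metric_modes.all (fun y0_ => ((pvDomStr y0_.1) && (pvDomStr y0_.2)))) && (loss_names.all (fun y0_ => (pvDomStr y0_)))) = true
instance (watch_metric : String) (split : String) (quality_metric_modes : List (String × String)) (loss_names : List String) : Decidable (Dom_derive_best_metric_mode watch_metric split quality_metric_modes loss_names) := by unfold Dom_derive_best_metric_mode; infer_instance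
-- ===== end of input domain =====

-- B replaces A's materialised set of loss keys by a direct decomposition of watch_metric
-- (equality with "{split}_loss", or prefix "{split}_loss/" plus one membership test); objective: simpler.

-- ===== PORT A =====
def derive_best_metric_mode (watch_metric : String) (split : String) (quality_metric_modes : List (String × String)) (loss_names : List String) : String :=
  match (PySem.Dict.mk quality_metric_modes).get? watch_metric with
  | some v => v
  | none =>
    let loss_keys : PySem.Set String :=
      loss_names.foldl (fun s name =>
        if name = "loss" then PySem.Set.add s (split ++ "_loss")
        else PySem.Set.add s (split ++ "_loss/" ++ name)) PySem.Set.empty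
    if PySem.Set.contains loss_keys watch_metric then "min" else "max"

-- ===== PORT B =====
def derive_best_metric_mode_alt (watch_metric : String) (split : String) (quality_metric_modes : List (String × String)) (loss_names : List String) : String :=
  match (PySem.Dict.mk quality_metric_modes).get? watch_metric with
  | some v => v
  | none =>
    if watch_metric = split ++ "_loss" then
      (if loss_names.contains "loss" then "min" else "max")
    else
      let pfx := split ++ "_loss/"
      if PySem.Str.startswith watch_metric pfx then
        let name := PySem.Str.slice watch_metric (some (PySem.Str.len pfx : Int)) none
        if loss_names.contains name && name ≠ "loss" then "min" else "max"
      else "max"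

-- ===== PRECONDITION & SPEC =====
def Spec_derive_best_metric_mode (watch_metric : String) (split : String) (quality_metric_modes : List (String × String)) (loss_names : List String) (out : String) : Prop := out = derive_best_metric_mode_alt watch_metric split quality_metric_modes loss_names
instance (watch_metric : String) (split : String) (quality_metric_modes : List (String × String)) (loss_names : List String) (out : String) : Decidable (Spec_derive_best_metric_mode watch_metric split quality_metric_modes loss_names out) := by unfold Spec_derive_best_metric_mode; infer_instance

-- ===== CLAIM (what is proved, stated in full; the proofs are below) =====
def Claim_equal_derive_best_metric_mode : Prop := ∀ (watch_metric : String) (split : String) (quality_metric_modes : List (String × String)) (loss_names : List String), Dom_derive_best_metric_mode watch_metric split quality_metric_modes loss_names → Spec_derive_best_metric_mode watch_metric split quality_metric_modes loss_names (derive_best_metric_mode watch_metric split quality_metric_modes loss_names)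

-- ===== LEMMAS AND PROOFS =====

-- the two key shapes are never equal (length argument)
theorem pv_key_ne (split n : String) : split ++ "_loss" ≠ split ++ "_loss/" ++ n := by
  intro h
  have := congrArg (fun s => s.toList.length) h
  simp [String.toList_append] at this

-- watch_metric membership in A's loss_keys set, characterised
theorem pv_mem_loss_keys (watch_metric split : String) (loss_names : List String) :
    (watch_metric ∈ loss_names.foldl (fun s name =>
        if name = "loss" then PySem.Set.add s (split ++ "_loss")
        else PySem.Set.add s (split ++ "_loss/" ++ name)) PySem.Set.empty) ↔
    ∃ name ∈ loss_names, watch_metric =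
        (if name = "loss" then split ++ "_loss" else split ++ "_loss/" ++ name) := by
  have hfun : (fun (s : PySem.Set String) name =>
        if name = "loss" then PySem.Set.add s (split ++ "_loss")
        else PySem.Set.add s (split ++ "_loss/" ++ name))
      = (fun (s : PySem.Set String) name =>
        PySem.Set.add s (if name = "loss" then split ++ "_loss" else split ++ "_loss/" ++ name)) := by
    funext s name
    by_cases h : name = "loss" <;> simp [h]
  rw [hfun]
  have h := PySem.Set.mem_foldl_add (l := loss_names) (s := (PySem.Set.empty : PySem.Set String))
      (f := fun name => if name = "loss" then split ++ "_loss" else split ++ "_loss/" ++ name)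
      (y := watch_metric)
  simpa [PySem.Set.empty] using h

-- the stripped name: watch_metric with the prefix "{split}_loss/" removed
theorem pv_slice_eq (watch_metric split : String) (rest : List Char)
    (hrest : (split ++ "_loss/").toList ++ rest = watch_metric.toList) :
    PySem.Str.slice watch_metric (some (PySem.Str.len (split ++ "_loss/") : Int)) none
      = String.ofList rest := by
  apply String.toList_inj.mp
  rw [PySem.Str.toList_slice, PySem.Str.len_eq]
  show PySem.List.slice watch_metric.toList (some ((split ++ "_loss/").toList.length : Int)) none = _
  rw [PySem.List.slice_from_natCast]
  simp only [← hrest, String.toList_append, String.toList_ofList]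
  exact List.drop_left' rfl

theorem derive_best_metric_mode_eq_alt (watch_metric split : String)
    (quality_metric_modes : List (String × String)) (loss_names : List String) :
    derive_best_metric_mode watch_metric split quality_metric_modes loss_names
      = derive_best_metric_mode_alt watch_metric split quality_metric_modes loss_names := by
  unfold derive_best_metric_mode derive_best_metric_mode_alt
  cases (PySem.Dict.mk quality_metric_modes).get? watch_metric with
  | some v => rfl
  | none =>
    simp only []
    have hmem := pv_mem_loss_keys watch_metric split loss_names
    set lk := loss_names.foldl (fun s name =>
        if name = "loss" then PySem.Set.add s (split ++ "_loss")
        else PySem.Set.add s (split ++ "_loss/" ++ name)) PySem.Set.empty with hlk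
    by_cases hm : watch_metric ∈ lk
    · -- A returns "min"
      rw [if_pos ((PySem.Set.contains_iff _ watch_metric).mpr hm)]
      obtain ⟨name, hn, he⟩ := hmem.mp hm
      by_cases h : name = "loss"
      · -- watch_metric = split ++ "_loss"
        rw [if_pos h] at he
        rw [if_pos he, if_pos (by simpa using (h ▸ hn : "loss" ∈ loss_names))]
      · rw [if_neg h] at he
        have hne : watch_metric ≠ split ++ "_loss" := by
          rw [he]; intro hc; exact pv_key_ne split name hc.symm
        rw [if_neg hne]
        have hpre : PySem.Str.startswith watch_metric (split ++ "_loss/") = true := by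
          rw [PySem.Str.startswith_eq, PySem.Chars.startswith_iff, he]
          exact ⟨name.toList, by simp [String.toList_append, String.append_assoc]⟩
        rw [if_pos hpre]
        have hrest : (split ++ "_loss/").toList ++ name.toList = watch_metric.toList := by
          rw [he]; simp [String.toList_append, String.append_assoc]
        rw [pv_slice_eq watch_metric split name.toList hrest]
        have : String.ofList name.toList = name := String.toList_inj.mp (by simp)
        rw [this, if_pos (by simp [hn, h])]
    · -- A returns "max"
      rw [if_neg (fun hc => hm ((PySem.Set.contains_iff _ watch_metric).mp hc))]
      have hno : ∀ name ∈ loss_names, watch_metric ≠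
          (if name = "loss" then split ++ "_loss" else split ++ "_loss/" ++ name) := by
        intro name hn he
        exact hm (hmem.mpr ⟨name, hn, he⟩)
      by_cases heq : watch_metric = split ++ "_loss"
      · rw [if_pos heq, if_neg]
        simp only [List.contains_eq_mem, decide_eq_true_eq]
        intro hl
        exact hno "loss" hl (by rw [if_pos rfl]; exact heq)
      · rw [if_neg heq]
        by_cases hpre : PySem.Str.startswith watch_metric (split ++ "_loss/") = true
        · rw [if_pos hpre]
          obtain ⟨rest, hrest⟩ := (PySem.Chars.startswith_iff _ _).mp
            (by rw [← PySem.Str.startswith_eq]; exact hpre)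
          rw [pv_slice_eq watch_metric split rest hrest]
          rw [if_neg]
          simp only [Bool.and_eq_true, List.contains_eq_mem, decide_eq_true_eq, ne_eq,
            not_and, Decidable.not_not]
          intro hn
          by_contra hne
          apply hno (String.ofList rest) hn
          rw [if_neg hne]
          apply String.toList_inj.mp
          simp [String.toList_append, ← hrest]
        · rw [if_neg hpre]

-- ===== VERDICT (by name: the statement is the Claim_ definition above) =====
theorem derive_best_metric_mode_spec : Claim_equal_derive_best_metric_mode := by
  intro watch_metric split quality_metric_modes loss_names _
  unfold Spec_derive_best_metric_mode
  exact derive_best_metric_mode_eq_alt watch_metric split quality_metric_modes loss_names
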